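-- pv_equiv track=rewrite | github.com/Bless-luthomo/Travail-cryptologie- | ProgCryptologie.py | repertoire_encrypt
-- ===== SOURCE A (Python) =====
-- def normalize_phrase(s):
--     return ' '.join(s.strip().upper().split())
--
-- def repertoire_encrypt(text, code):
--     if not text:
--         return ""
--     norm_map = {normalize_phrase(k): v for k, v in code.items()}
--     max_words = max(len(k.split()) for k in norm_map)
--
--     tokens = text.strip().split()
--     out = []
--     i = 0
--     while i < len(tokens):
--         matched = False
--         max_try = min(max_words, len(tokens)-i)
--         for length in range(max_try, 0, -1):
--             attempt = normalize_phrase(' '.join(tokens[i:i+length]))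
--             if attempt in norm_map:
--                 out.append(norm_map[attempt])
--                 i += length
--                 matched = True
--                 break
--         if not matched:
--             out.append(tokens[i])
--             i += 1
--     return ' '.join(out)
-- ===== SOURCE B (Python) =====
-- def repertoire_encrypt(text, code):
--     if not text:
--         return ""
--     # Build a word-trie over the normalized (uppercased word sequence) keys;
--     # later duplicate keys overwrite the code stored at the terminal node.
--     root = {"val": None, "kids": {}}
--     for k, v in code.items():
--         node = root
--         for w in k.strip().upper().split():
--             node = node["kids"].setdefault(w, {"val": None, "kids": {}})
--         node["val"] = v
--     tokens = text.split()
--     out = []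
--     i = 0
--     while i < len(tokens):
--         node = root
--         best = None  # (code, number of tokens consumed) of deepest terminal
--         j = i
--         while j < len(tokens):
--             nxt = node["kids"].get(tokens[j].upper())
--             if nxt is None:
--                 break
--             node = nxt
--             j += 1
--             if node["val"] is not None:
--                 best = (node["val"], j - i)
--         if best is None:
--             out.append(tokens[i])
--             i += 1
--         else:
--             out.append(best[0])
--             i += best[1]
--     return ' '.join(out)
-- ===== Notes on version B (the rewrite author's own statement) =====
-- stated objective: alternative
-- what changed: Replaces A's per-position descending-length loop that re-joins and re-normalizes each candidate phrase and probes a dict of normalized phrase strings by a word-trie built once from the code keys and walked once per position, emitting the deepest terminal's code.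
import Mathlib
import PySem

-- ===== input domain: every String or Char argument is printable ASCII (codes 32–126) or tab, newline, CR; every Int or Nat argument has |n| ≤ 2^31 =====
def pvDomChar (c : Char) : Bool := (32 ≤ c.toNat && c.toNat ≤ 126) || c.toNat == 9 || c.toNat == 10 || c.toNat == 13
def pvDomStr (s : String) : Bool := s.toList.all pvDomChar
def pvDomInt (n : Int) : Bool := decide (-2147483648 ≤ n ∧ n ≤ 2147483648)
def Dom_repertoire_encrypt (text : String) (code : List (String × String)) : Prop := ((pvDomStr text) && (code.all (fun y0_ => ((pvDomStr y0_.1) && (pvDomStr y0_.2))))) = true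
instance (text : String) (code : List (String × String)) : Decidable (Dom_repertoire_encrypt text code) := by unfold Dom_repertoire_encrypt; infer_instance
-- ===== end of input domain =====

-- B replaces A's per-position descending-length rescan of joined phrases by a word-trie
-- walked once per position (objective: alternative data structure, same exact behaviour).

-- ===== PORT A =====

-- normalize_phrase(s) = ' '.join(s.strip().upper().split())
def pvNormalize (s : String) : String :=
  PySem.Str.join " " (PySem.Str.split₀ (PySem.Str.upper (PySem.Str.strip s)))

-- norm_map = {normalize_phrase(k): v for k, v in code.items()}
def pvNormMap (code : List (String × String)) : PySem.Dict String String :=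
  code.foldl (fun d kv => d.insert (pvNormalize kv.1) kv.2) PySem.Dict.empty

-- max_words = max(len(k.split()) for k in norm_map); `.getD 0` is only reached when the
-- dict is empty, where the Python max() raises ValueError (excluded by Pre_).
def pvMaxWords (d : PySem.Dict String String) : Nat :=
  (PySem.List.max? (d.keys.map (fun k => (PySem.Str.split₀ k).length)) (fun x => x)).getD 0

-- the inner `for length in range(max_try, 0, -1)` loop; `rem` is tokens[i:], so
-- tokens[i:i+length] is rem.take length
def pvTryA (d : PySem.Dict String String) : Nat → List String → Option (String × Nat)
  | 0, _ => none
  | (l+1), rem =>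
    let attempt := pvNormalize (PySem.Str.join " " (rem.take (l+1)))
    match d.get? attempt with
    | some v => some (v, l + 1)
    | none => pvTryA d l rem

-- the outer `while i < len(tokens)` loop, with the suffix tokens[i:] as the state;
-- `i += length` is dropping `length` tokens (length ≥ 1, so `ts.drop (l-1)` below)
def pvLoopA (d : PySem.Dict String String) (mw : Nat) : List String → List String
  | [] => []
  | t :: ts =>
    match pvTryA d (min mw (ts.length + 1)) (t :: ts) with
    | some (v, l) => v :: pvLoopA d mw (ts.drop (l - 1))
    | none => t :: pvLoopA d mw ts
termination_by xs => xs.length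
decreasing_by
  all_goals simp only [List.length_drop, List.length_cons]; omega

def repertoire_encrypt (text : String) (code : List (String × String)) : String :=
  if text = "" then ""
  else
    let d := pvNormMap code
    let tokens := PySem.Str.split₀ (PySem.Str.strip text)
    PySem.Str.join " " (pvLoopA d (pvMaxWords d) tokens)

-- ===== PORT B =====

-- the nested-dict trie node {"val": …, "kids": {…}} (explicit child list: a mutual pair)
mutual
inductive PvTrie where
  | mk : Option String → PvKids → PvTrie
inductive PvKids where
  | nil : PvKids
  | cons : String → PvTrie → PvKids → PvKids
end

def pvVal : PvTrie → Option String
  | .mk v _ => v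

def pvKidsOf : PvTrie → PvKids
  | .mk _ k => k

-- node["kids"].get(w)
def pvFind : PvKids → String → Option PvTrie
  | .nil, _ => none
  | .cons w' t rest, w => if w' = w then some t else pvFind rest w

-- store (or overwrite in place) the child for w — the functional image of mutating
-- the child that setdefault returned
def pvSet : PvKids → String → PvTrie → PvKids
  | .nil, w, t => .cons w t .nil
  | .cons w' t' rest, w, t => if w' = w then .cons w' t rest else .cons w' t' (pvSet rest w t)

-- the `for w in …: node = node["kids"].setdefault(w, …)` descent plus `node["val"] = v`
def pvInsert : List String → PvTrie → String → PvTrie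
  | [], .mk _ kids, v => .mk (some v) kids
  | w :: ws, .mk val kids, v =>
    .mk val (pvSet kids w (pvInsert ws ((pvFind kids w).getD (.mk none .nil)) v))

-- k.strip().upper().split()
def pvWordsKey (k : String) : List String :=
  PySem.Str.split₀ (PySem.Str.upper (PySem.Str.strip k))

-- the trie-building loop over code.items()
def pvBuild (code : List (String × String)) : PvTrie :=
  code.foldl (fun t kv => pvInsert (pvWordsKey kv.1) t kv.2) (.mk none .nil)

-- the inner `while j < len(tokens)` walk: descend the trie on uppercased tokens,
-- remembering the deepest terminal (code, consumed count)
def pvWalk : PvTrie → List String → Nat → Option (String × Nat) → Option (String × Nat)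
  | _, [], _, best => best
  | t, w :: rest, cnt, best =>
    match pvFind (pvKidsOf t) (PySem.Str.upper w) with
    | none => best
    | some t' =>
      let cnt' := cnt + 1
      let best' := match pvVal t' with
        | some v => some (v, cnt')
        | none => best
      pvWalk t' rest cnt' best'

-- the outer while loop over the remaining tokens; advance by the matched length (≥ 1)
def pvLoopB (root : PvTrie) : List String → List String
  | [] => []
  | t :: ts =>
    match pvWalk root (t :: ts) 0 none with
    | some (v, l) => v :: pvLoopB root (ts.drop (l - 1))
    | none => t :: pvLoopB root ts
termination_by xs => xs.length
decreasing_by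
  all_goals simp only [List.length_drop, List.length_cons]; omega

def repertoire_encrypt_alt (text : String) (code : List (String × String)) : String :=
  if text = "" then ""
  else
    let root := pvBuild code
    let tokens := PySem.Str.split₀ text
    PySem.Str.join " " (pvLoopB root tokens)

-- ===== PRECONDITION & SPEC =====

-- Pre_ excludes nonempty text with an empty code dictionary, where A's max() over the
-- empty key set raises ValueError (B's trie would simply return the tokens unchanged there).
def Pre_repertoire_encrypt (text : String) (code : List (String × String)) : Prop :=
  text = "" ∨ code ≠ []
instance (text : String) (code : List (String × String)) : Decidable (Pre_repertoire_encrypt text code) := by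
  unfold Pre_repertoire_encrypt; infer_instance

def pvWitness_repertoire_encrypt : String × (List (String × String)) :=
  ("we attack at dawn", [("Attack  at DAWN", "X7"), ("we", "Z1")])

def Spec_repertoire_encrypt (text : String) (code : List (String × String)) (out : String) : Prop :=
  out = repertoire_encrypt_alt text code
instance (text : String) (code : List (String × String)) (out : String) : Decidable (Spec_repertoire_encrypt text code out) := by
  unfold Spec_repertoire_encrypt; infer_instance

-- ===== CLAIM (what is proved, stated in full; the proofs are below) =====
def Claim_equal_repertoire_encrypt : Prop := ∀ (text : String) (code : List (String × String)), Dom_repertoire_encrypt text code → Pre_repertoire_encrypt text code → Spec_repertoire_encrypt text code (repertoire_encrypt text code)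


-- ===== LEMMAS AND PROOFS =====

-- ---- good words: nonempty, whitespace-free ----
def pvGoodW (w : List Char) : Prop := w ≠ [] ∧ ∀ c ∈ w, PySem.Chars.isspace c = false
def pvGoodS (s : String) : Prop := pvGoodW s.toList

-- ---- char-level split₀ facts ----
lemma pv_go_nil (cur : List Char) (acc : List (List Char)) :
    PySem.Chars.split₀.go [] cur acc =
      if cur.isEmpty then acc.reverse else (cur.reverse :: acc).reverse := by
  rw [PySem.Chars.split₀.go]

lemma pv_go_cons_space {c : Char} (hc : PySem.Chars.isspace c = true) (rest cur : List Char)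
    (acc : List (List Char)) :
    PySem.Chars.split₀.go (c :: rest) cur acc =
      if cur.isEmpty then PySem.Chars.split₀.go rest [] acc
      else PySem.Chars.split₀.go rest [] (cur.reverse :: acc) := by
  rw [PySem.Chars.split₀.go]; simp [hc]

lemma pv_go_cons_nonspace {c : Char} (hc : PySem.Chars.isspace c = false) (rest cur : List Char)
    (acc : List (List Char)) :
    PySem.Chars.split₀.go (c :: rest) cur acc = PySem.Chars.split₀.go rest (c :: cur) acc := by
  rw [PySem.Chars.split₀.go]; simp [hc]

lemma pv_go_nonspace (w : List Char) (hw : ∀ c ∈ w, PySem.Chars.isspace c = false) :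
    ∀ t cur acc, PySem.Chars.split₀.go (w ++ t) cur acc = PySem.Chars.split₀.go t (w.reverse ++ cur) acc := by
  induction w with
  | nil => intro t cur acc; simp
  | cons c w ih =>
    intro t cur acc
    rw [List.cons_append, pv_go_cons_nonspace (hw c (by simp)),
      ih (fun x hx => hw x (by simp [hx])) t (c :: cur) acc]
    simp

lemma pv_go_allspace_nil (t : List Char) (ht : ∀ c ∈ t, PySem.Chars.isspace c = true) :
    ∀ cur acc, PySem.Chars.split₀.go t cur acc = PySem.Chars.split₀.go [] cur acc := by
  induction t with
  | nil => intro cur acc; rfl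
  | cons c t ih =>
    intro cur acc
    rw [pv_go_cons_space (ht c (by simp)) t cur acc]
    by_cases hcur : cur.isEmpty
    · rw [if_pos hcur, ih (fun x hx => ht x (by simp [hx])) [] acc, pv_go_nil, pv_go_nil]
      simp [hcur]
    · rw [if_neg hcur, ih (fun x hx => ht x (by simp [hx])) [] (cur.reverse :: acc), pv_go_nil,
        pv_go_nil]
      simp [hcur]

lemma pv_go_append_spaces (t : List Char) (ht : ∀ c ∈ t, PySem.Chars.isspace c = true) :
    ∀ s cur acc, PySem.Chars.split₀.go (s ++ t) cur acc = PySem.Chars.split₀.go s cur acc := by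
  intro s
  induction s with
  | nil => intro cur acc; simpa using pv_go_allspace_nil t ht cur acc
  | cons c s ih =>
    intro cur acc
    by_cases hc : PySem.Chars.isspace c = true
    · rw [List.cons_append, pv_go_cons_space hc, pv_go_cons_space hc]
      by_cases hcur : cur.isEmpty
      · rw [if_pos hcur, if_pos hcur, ih]
      · rw [if_neg hcur, if_neg hcur, ih]
    · rw [List.cons_append, pv_go_cons_nonspace (by simpa using hc),
        pv_go_cons_nonspace (by simpa using hc), ih]

lemma pv_go_dropWhile (s : List Char) :
    ∀ acc, PySem.Chars.split₀.go (s.dropWhile PySem.Chars.isspace) [] acc = PySem.Chars.split₀.go s [] acc := by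
  induction s with
  | nil => intro acc; rfl
  | cons c s ih =>
    intro acc
    by_cases hc : PySem.Chars.isspace c = true
    · rw [List.dropWhile_cons_of_pos hc, ih, pv_go_cons_space hc]
      simp
    · rw [List.dropWhile_cons_of_neg (by simp [hc])]

lemma pv_split_strip (s : List Char) : PySem.Chars.split₀ (PySem.Chars.strip s) = PySem.Chars.split₀ s := by
  unfold PySem.Chars.split₀ PySem.Chars.strip PySem.Chars.rstrip PySem.Chars.lstrip
  set u := s.dropWhile PySem.Chars.isspace with hu
  have hdecomp : u = (u.reverse.dropWhile PySem.Chars.isspace).reverse ++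
      (u.reverse.takeWhile PySem.Chars.isspace).reverse := by
    conv_lhs => rw [← List.reverse_reverse u, ← List.takeWhile_append_dropWhile
      (p := PySem.Chars.isspace) (l := u.reverse)]
    rw [List.reverse_append]
  have hsp : ∀ c ∈ (u.reverse.takeWhile PySem.Chars.isspace).reverse, PySem.Chars.isspace c = true := by
    intro c hc
    exact List.mem_takeWhile_imp (by simpa using hc)
  calc PySem.Chars.split₀.go (u.reverse.dropWhile PySem.Chars.isspace).reverse [] []
      = PySem.Chars.split₀.go ((u.reverse.dropWhile PySem.Chars.isspace).reverse ++
          (u.reverse.takeWhile PySem.Chars.isspace).reverse) [] [] := (pv_go_append_spaces _ hsp _ _ _).symm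
    _ = PySem.Chars.split₀.go u [] [] := by rw [← hdecomp]
    _ = PySem.Chars.split₀.go s [] [] := pv_go_dropWhile s []

lemma pv_go_good (s : List Char) :
    ∀ cur acc, (∀ c ∈ cur, PySem.Chars.isspace c = false) → (∀ w ∈ acc, pvGoodW w) →
      ∀ w ∈ PySem.Chars.split₀.go s cur acc, pvGoodW w := by
  induction s with
  | nil =>
    intro cur acc hcur hacc w hw
    rw [pv_go_nil] at hw
    by_cases hc : cur.isEmpty
    · rw [if_pos hc] at hw
      exact hacc w (by simpa using hw)
    · rw [if_neg hc] at hw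
      rcases (by simpa using hw : w ∈ acc ∨ w = cur.reverse) with h | h
      · exact hacc w h
      · subst h
        refine ⟨by simpa [List.isEmpty_iff] using hc, fun c hc' => hcur c (by simpa using hc')⟩
  | cons c s ih =>
    intro cur acc hcur hacc w hw
    by_cases hc : PySem.Chars.isspace c = true
    · rw [pv_go_cons_space hc] at hw
      by_cases hcur' : cur.isEmpty
      · rw [if_pos hcur'] at hw
        exact ih [] acc (by simp) hacc w hw
      · rw [if_neg hcur'] at hw
        refine ih [] (cur.reverse :: acc) (by simp) ?_ w hw
        intro w' hw'
        rcases (by simpa using hw' : w' = cur.reverse ∨ w' ∈ acc) with h | h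
        · subst h
          refine ⟨by simpa [List.isEmpty_iff] using hcur', fun c hc' => hcur c (by simpa using hc')⟩
        · exact hacc w' h
    · rw [pv_go_cons_nonspace (by simpa using hc)] at hw
      refine ih (c :: cur) acc ?_ hacc w hw
      intro x hx
      rcases (by simpa using hx : x = c ∨ x ∈ cur) with h | h
      · subst h; simpa using hc
      · exact hcur x h

lemma pv_split_good (s : List Char) : ∀ w ∈ PySem.Chars.split₀ s, pvGoodW w := by
  exact pv_go_good s [] [] (by simp) (by simp)

lemma pv_join_go (css : List (List Char)) (h : ∀ w ∈ css, pvGoodW w) (hne : css ≠ []) :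
    ∀ acc, PySem.Chars.split₀.go (PySem.Chars.join [' '] css) [] acc = acc.reverse ++ css := by
  induction css with
  | nil => exact absurd rfl hne
  | cons w rest ih =>
    intro acc
    have hw := h w (by simp)
    have hwrev : (w.reverse ++ ([] : List Char)).isEmpty = false := by
      simp [hw.1]
    cases rest with
    | nil =>
      rw [PySem.Chars.join_singleton, ← List.append_nil w,
        pv_go_nonspace w hw.2 [] [] acc, pv_go_nil, if_neg (by simp [List.isEmpty_iff]; exact hw.1)]
      simp
    | cons x rest' =>
      rw [PySem.Chars.join_cons_cons, List.append_assoc,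
        pv_go_nonspace w hw.2 _ [] acc, List.singleton_append,
        pv_go_cons_space (by decide) _ _ acc, if_neg (by simp [List.isEmpty_iff]; exact hw.1),
        ih (fun y hy => h y (by simp [hy])) (by simp) _]
      simp

lemma pv_split_join (css : List (List Char)) (h : ∀ w ∈ css, pvGoodW w) :
    PySem.Chars.split₀ (PySem.Chars.join [' '] css) = css := by
  cases hcs : css with
  | nil => simp [PySem.Chars.join_nil, PySem.Chars.split₀, pv_go_nil]
  | cons w rest =>
    subst hcs
    unfold PySem.Chars.split₀
    rw [pv_join_go _ h (by simp)]
    simp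

-- ---- upper interaction ----
lemma pv_isspace_mid (c : Char) (h1 : 65 ≤ c.toNat) (h2 : c.toNat ≤ 122) :
    PySem.Chars.isspace c = false := by
  simp [PySem.Chars.isspace]; omega

lemma pv_isspace_upperChar (c : Char) :
    PySem.Chars.isspace (PySem.Chars.upperChar c) = PySem.Chars.isspace c := by
  unfold PySem.Chars.upperChar
  by_cases h : PySem.Chars.islower c = true
  · rw [if_pos h]
    have hb : 97 ≤ c.toNat ∧ c.toNat ≤ 122 := by
      simp only [PySem.Chars.islower, Bool.and_eq_true, decide_eq_true_eq] at h
      exact ⟨h.1, h.2⟩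
    have hv : (c.toNat - 32).isValidChar := by left; omega
    have ht : (Char.ofNat (c.toNat - 32)).toNat = c.toNat - 32 := by
      rw [Char.toNat_ofNat]; simp [hv]
    rw [pv_isspace_mid _ (by omega) (by omega), pv_isspace_mid _ (by omega) (by omega)]
  · rw [if_neg h]

lemma pv_isspace_comp_upperChar :
    (PySem.Chars.isspace ∘ PySem.Chars.upperChar) = PySem.Chars.isspace := by
  funext c; exact pv_isspace_upperChar c

lemma pv_strip_upper (s : List Char) :
    PySem.Chars.strip (PySem.Chars.upper s) = PySem.Chars.upper (PySem.Chars.strip s) := by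
  unfold PySem.Chars.strip PySem.Chars.rstrip PySem.Chars.lstrip PySem.Chars.upper
  rw [List.dropWhile_map, pv_isspace_comp_upperChar, ← List.map_reverse, List.dropWhile_map,
    pv_isspace_comp_upperChar, ← List.map_reverse]

lemma pv_upper_join (css : List (List Char)) :
    PySem.Chars.upper (PySem.Chars.join [' '] css) = PySem.Chars.join [' '] (css.map PySem.Chars.upper) := by
  induction css with
  | nil => simp [PySem.Chars.join_nil, PySem.Chars.upper]
  | cons w rest ih =>
    cases rest with
    | nil => simp [PySem.Chars.join_singleton, PySem.Chars.upper]
    | cons x rest' =>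
      have h1 : PySem.Chars.upper (w ++ [' '] ++ PySem.Chars.join [' '] (x :: rest'))
          = PySem.Chars.upper w ++ [' '] ++ PySem.Chars.upper (PySem.Chars.join [' '] (x :: rest')) := by
        simp [PySem.Chars.upper, PySem.Chars.upperChar, PySem.Chars.islower]
      rw [PySem.Chars.join_cons_cons, h1, ih]
      simp [PySem.Chars.join_cons_cons]

lemma pv_good_upper (w : List Char) (h : pvGoodW w) : pvGoodW (PySem.Chars.upper w) := by
  refine ⟨by simpa [PySem.Chars.upper] using h.1, ?_⟩
  intro c hc
  rcases List.mem_map.mp (by simpa [PySem.Chars.upper] using hc) with ⟨x, hx, rfl⟩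
  rw [pv_isspace_upperChar]
  exact h.2 x hx

-- ---- Str-level lifts ----
lemma pv_space_toList : (" " : String).toList = [' '] := rfl

lemma pv_goodS_split (s : String) : ∀ w ∈ PySem.Str.split₀ s, pvGoodS w := by
  intro w hw
  rcases List.mem_map.mp (by simpa [PySem.Str.split₀] using hw) with ⟨cw, hcw, rfl⟩
  have := pv_split_good s.toList cw hcw
  simpa [pvGoodS, String.toList_ofList] using this

lemma pv_strS_split_strip (s : String) : PySem.Str.split₀ (PySem.Str.strip s) = PySem.Str.split₀ s := by
  simp [PySem.Str.split₀, PySem.Str.strip, String.toList_ofList, pv_split_strip]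

lemma pv_goodW_map_toList (ws : List String) (h : ∀ w ∈ ws, pvGoodS w) :
    ∀ cw ∈ ws.map String.toList, pvGoodW cw := by
  intro cw hcw
  rcases List.mem_map.mp hcw with ⟨w, hw, rfl⟩
  exact h w hw

lemma pv_strS_split_join (ws : List String) (h : ∀ w ∈ ws, pvGoodS w) :
    PySem.Str.split₀ (PySem.Str.join " " ws) = ws := by
  simp only [PySem.Str.split₀, PySem.Str.join, String.toList_ofList, pv_space_toList]
  rw [pv_split_join _ (pv_goodW_map_toList ws h)]
  simp [Function.comp_def]

lemma pv_join_inj (ws ws' : List String) (h : ∀ w ∈ ws, pvGoodS w) (h' : ∀ w ∈ ws', pvGoodS w)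
    (he : PySem.Str.join " " ws = PySem.Str.join " " ws') : ws = ws' := by
  have := congrArg PySem.Str.split₀ he
  rwa [pv_strS_split_join ws h, pv_strS_split_join ws' h'] at this

-- normalize(' '.join(ws)) = ' '.join(w.upper() for w in ws) on good tokens
lemma pv_normalize_join (ws : List String) (h : ∀ w ∈ ws, pvGoodS w) :
    pvNormalize (PySem.Str.join " " ws) = PySem.Str.join " " (ws.map PySem.Str.upper) := by
  have harg : PySem.Str.split₀ (PySem.Str.upper (PySem.Str.strip (PySem.Str.join " " ws)))
      = ws.map PySem.Str.upper := by
    simp only [PySem.Str.split₀, PySem.Str.upper, PySem.Str.strip, PySem.Str.join,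
      String.toList_ofList, pv_space_toList]
    rw [← pv_strip_upper, pv_split_strip, pv_upper_join, pv_split_join _ (by
    intro cw hcw
    rcases List.mem_map.mp hcw with ⟨x, hx, rfl⟩
    exact pv_good_upper x (pv_goodW_map_toList ws h x hx))]
    simp only [List.map_map]
    rfl
  unfold pvNormalize
  rw [harg]

lemma pv_goodS_upper (w : String) (h : pvGoodS w) : pvGoodS (PySem.Str.upper w) := by
  unfold pvGoodS
  simp only [PySem.Str.upper, String.toList_ofList]
  exact pv_good_upper _ h

lemma pv_normalize_eq_join_wordsKey (k : String) :
    pvNormalize k = PySem.Str.join " " (pvWordsKey k) := rfl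

lemma pv_goodS_wordsKey (k : String) : ∀ w ∈ pvWordsKey k, pvGoodS w := by
  exact pv_goodS_split _

-- ---- trie lookup (proof-side characterization) ----
def pvLookup : PvTrie → List String → Option String
  | t, [] => pvVal t
  | t, w :: ws =>
    match pvFind (pvKidsOf t) w with
    | none => none
    | some t' => pvLookup t' ws

def pvMDict (code : List (String × String)) : PySem.Dict (List String) String :=
  code.foldl (fun d kv => d.insert (pvWordsKey kv.1) kv.2) PySem.Dict.empty

lemma pv_find_set : ∀ (ks : PvKids) (w w' : String) (t : PvTrie),
    pvFind (pvSet ks w t) w' = if w = w' then some t else pvFind ks w'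
  | .nil, w, w', t => by simp only [pvSet, pvFind]
  | .cons wk tk rest, w, w', t => by
    simp only [pvSet]
    by_cases hk : wk = w
    · subst hk
      simp [pvFind]
      by_cases h : wk = w' <;> simp [h]
    · rw [if_neg hk]
      simp only [pvFind, pv_find_set rest w w' t]
      by_cases hw : wk = w'
      · subst hw
        rw [if_pos rfl, if_neg (fun h => hk h.symm), if_pos rfl]
      · rw [if_neg hw, if_neg hw]

lemma pv_lookup_empty (ws : List String) : pvLookup (.mk none .nil) ws = none := by
  cases ws with
  | nil => rfl
  | cons w ws => simp [pvLookup, pvKidsOf, pvFind]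

lemma pv_lookup_insert (u : List String) (t : PvTrie) (v : String) (ws : List String) :
    pvLookup (pvInsert u t v) ws = if ws = u then some v else pvLookup t ws := by
  induction u generalizing t ws with
  | nil =>
    obtain ⟨val, kids⟩ := t
    cases ws with
    | nil => simp [pvInsert, pvLookup, pvVal]
    | cons w ws' => simp [pvInsert, pvLookup, pvKidsOf]
  | cons x u' ih =>
    obtain ⟨val, kids⟩ := t
    cases ws with
    | nil => simp [pvInsert, pvLookup, pvVal]
    | cons w ws' =>
      simp only [pvInsert, pvLookup, pvKidsOf, pv_find_set]
      by_cases hxw : x = w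
      · subst hxw
        rw [if_pos rfl]
        show pvLookup (pvInsert u' ((pvFind kids x).getD (PvTrie.mk none PvKids.nil)) v) ws' = _
        rw [ih _ ws']
        by_cases hws : ws' = u'
        · subst hws
          rw [if_pos rfl, if_pos rfl]
        · rw [if_neg hws, if_neg (show ¬(x :: ws' = x :: u') by intro hh; injection hh with _ h2; exact hws h2)]
          cases hf : pvFind kids x with
          | none => simp [pv_lookup_empty]
          | some t0 => simp
      · rw [if_neg hxw, if_neg (show ¬(w :: ws' = x :: u') by intro hh; injection hh with h1 _; exact hxw h1.symm)]

lemma pv_lookup_build_aux (code : List (String × String)) :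
    ∀ (t : PvTrie) (d : PySem.Dict (List String) String),
      (∀ ws, pvLookup t ws = d.get? ws) →
      ∀ ws, pvLookup (code.foldl (fun t kv => pvInsert (pvWordsKey kv.1) t kv.2) t) ws
        = (code.foldl (fun d kv => d.insert (pvWordsKey kv.1) kv.2) d).get? ws := by
  induction code with
  | nil => intro t d h ws; exact h ws
  | cons kv rest ih =>
    intro t d h ws
    simp only [List.foldl_cons]
    refine ih _ _ ?_ ws
    intro ws'
    rw [pv_lookup_insert, PySem.Dict.get?_insert, h ws']

lemma pv_lookup_build (code : List (String × String)) (ws : List String) :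
    pvLookup (pvBuild code) ws = (pvMDict code).get? ws := by
  refine pv_lookup_build_aux code _ _ ?_ ws
  intro ws'
  rw [pv_lookup_empty]
  simp [PySem.Dict.get?_empty]

lemma pv_normMap_mDict_aux (code : List (String × String)) :
    ∀ (dS : PySem.Dict String String) (dL : PySem.Dict (List String) String),
      (∀ ws, (∀ w ∈ ws, pvGoodS w) → dS.get? (PySem.Str.join " " ws) = dL.get? ws) →
      ∀ ws, (∀ w ∈ ws, pvGoodS w) →
        (code.foldl (fun d kv => d.insert (pvNormalize kv.1) kv.2) dS).get? (PySem.Str.join " " ws)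
          = (code.foldl (fun d kv => d.insert (pvWordsKey kv.1) kv.2) dL).get? ws := by
  induction code with
  | nil => intro dS dL h ws hg; exact h ws hg
  | cons kv rest ih =>
    intro dS dL h ws hg
    simp only [List.foldl_cons]
    refine ih _ _ ?_ ws hg
    intro ws' hg'
    rw [PySem.Dict.get?_insert, PySem.Dict.get?_insert, pv_normalize_eq_join_wordsKey]
    by_cases hk : ws' = pvWordsKey kv.1
    · rw [if_pos (by rw [hk]), if_pos hk]
    · rw [if_neg (fun hj => hk (pv_join_inj _ _ hg' (pv_goodS_wordsKey kv.1) hj)), if_neg hk]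
      exact h ws' hg'

lemma pv_normMap_mDict (code : List (String × String)) (ws : List String) (h : ∀ w ∈ ws, pvGoodS w) :
    (pvNormMap code).get? (PySem.Str.join " " ws) = (pvMDict code).get? ws := by
  refine pv_normMap_mDict_aux code _ _ ?_ ws h
  intro ws' _
  simp [PySem.Dict.get?_empty]

lemma pv_maxWords_bound (code : List (String × String)) (ws : List String) (v : String)
    (h : ∀ w ∈ ws, pvGoodS w) (hg : (pvMDict code).get? ws = some v) :
    ws.length ≤ pvMaxWords (pvNormMap code) := by
  have hS : (pvNormMap code).get? (PySem.Str.join " " ws) = some v := by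
    rw [pv_normMap_mDict code ws h]; exact hg
  have hmem : PySem.Str.join " " ws ∈ (pvNormMap code).keys := by
    by_contra hmem
    rw [(PySem.Dict.get?_eq_none_iff_not_mem_keys _ _).mpr hmem] at hS
    simp at hS
  have hlen : ws.length ∈ (pvNormMap code).keys.map (fun k => (PySem.Str.split₀ k).length) := by
    refine List.mem_map.mpr ⟨PySem.Str.join " " ws, hmem, ?_⟩
    rw [pv_strS_split_join ws h]
  unfold pvMaxWords
  cases hmax : PySem.List.max? ((pvNormMap code).keys.map (fun k => (PySem.Str.split₀ k).length)) (fun x => x) with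
  | none =>
    rw [PySem.List.max?_eq_none_iff] at hmax
    rw [hmax] at hlen
    exact absurd hlen (List.not_mem_nil)
  | some m =>
    have := PySem.List.max?_isMax hmax _ hlen
    simpa using this

-- ---- the common descending scan ----
def pvPick (f : Nat → Option String) : Nat → Option (String × Nat)
  | 0 => none
  | (n+1) =>
    match f (n+1) with
    | some v => some (v, n+1)
    | none => pvPick f n

lemma pv_tryA_eq_pick (d : PySem.Dict String String) (m : Nat) (rem : List String) :
    pvTryA d m rem = pvPick (fun l => d.get? (pvNormalize (PySem.Str.join " " (rem.take l)))) m := by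
  induction m with
  | zero => rfl
  | succ m ih => simp only [pvTryA, pvPick, ih]

lemma pv_pick_congr (f g : Nat → Option String) (n : Nat) (h : ∀ l, f l = g l) :
    pvPick f n = pvPick g n := by
  induction n with
  | zero => rfl
  | succ n ih => simp only [pvPick, h, ih]

lemma pv_pick_none (f : Nat → Option String) (n : Nat) (h : ∀ l, 1 ≤ l → l ≤ n → f l = none) :
    pvPick f n = none := by
  induction n with
  | zero => rfl
  | succ n ih =>
    rw [pvPick, h (n+1) (by omega) (by omega)]
    exact ih (fun l h1 h2 => h l h1 (by omega))

lemma pv_pick_shrink (f : Nat → Option String) (m n : Nat) (hmn : m ≤ n)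
    (h : ∀ l, m < l → l ≤ n → f l = none) : pvPick f n = pvPick f m := by
  induction n with
  | zero =>
    have : m = 0 := by omega
    rw [this]
  | succ n ih =>
    by_cases hm : m = n + 1
    · rw [hm]
    · rw [pvPick, h (n+1) (by omega) (by omega)]
      exact ih (by omega) (fun l h1 h2 => h l h1 (by omega))

lemma pv_pick_shift (f f' : Nat → Option String) (n : Nat) (hs : ∀ l, f (l+1) = f' l) :
    pvPick f (n+1) = match pvPick f' n with
      | some (v, l) => some (v, l+1)
      | none => match f 1 with
        | some v => some (v, 1)
        | none => none := by
  induction n with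
  | zero => simp only [pvPick]
  | succ n ih =>
    rw [pvPick, hs (n+1)]
    rw [show pvPick f' (n+1) = match f' (n+1) with
        | some v => some (v, n+1) | none => pvPick f' n from rfl]
    cases hf : f' (n+1) with
    | some v => rfl
    | none => exact ih

lemma pv_walk_eq_pick : ∀ (ts : List String) (t : PvTrie) (cnt : Nat) (best : Option (String × Nat)),
    pvWalk t ts cnt best =
      match pvPick (fun l => pvLookup t ((ts.take l).map PySem.Str.upper)) ts.length with
      | some (v, l) => some (v, cnt + l)
      | none => best
  | [], t, cnt, best => by simp [pvWalk, pvPick]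
  | w :: rest, t, cnt, best => by
    cases hf : pvFind (pvKidsOf t) (PySem.Str.upper w) with
    | none =>
      have hnone : pvPick (fun l => pvLookup t (((w :: rest).take l).map PySem.Str.upper))
          (w :: rest).length = none := by
        refine pv_pick_none _ _ ?_
        intro l h1 _
        obtain ⟨l', rfl⟩ : ∃ l', l = l' + 1 := ⟨l - 1, by omega⟩
        simp only [List.take_succ_cons, List.map_cons, pvLookup, hf]
      simp only [pvWalk, hf, hnone]
    | some t' =>
      have hshift : ∀ l, pvLookup t (((w :: rest).take (l+1)).map PySem.Str.upper)
          = pvLookup t' ((rest.take l).map PySem.Str.upper) := by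
        intro l
        simp only [List.take_succ_cons, List.map_cons, pvLookup, hf]
      have hf1 : pvLookup t (((w :: rest).take 1).map PySem.Str.upper) = pvVal t' := by
        simp only [List.take_succ_cons, List.take_zero, List.map_cons, List.map_nil,
          pvLookup, hf]
      simp only [pvWalk, hf]
      rw [pv_walk_eq_pick rest t' (cnt+1) _, List.length_cons,
        pv_pick_shift _ _ rest.length hshift]
      cases hp : pvPick (fun l => pvLookup t' ((rest.take l).map PySem.Str.upper)) rest.length with
      | some vl =>
        obtain ⟨v, l⟩ := vl
        show some (v, cnt + 1 + l) = some (v, cnt + (l + 1))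
        have : cnt + 1 + l = cnt + (l + 1) := by omega
        rw [this]
      | none =>
        simp only [hf1]
        cases hv : pvVal t' <;> simp

-- ---- per-position and whole-loop equivalence ----
lemma pv_step_eq (code : List (String × String)) (rem : List String) (hg : ∀ w ∈ rem, pvGoodS w) :
    pvTryA (pvNormMap code) (min (pvMaxWords (pvNormMap code)) rem.length) rem
      = pvWalk (pvBuild code) rem 0 none := by
  have hfun : ∀ l, (pvNormMap code).get? (pvNormalize (PySem.Str.join " " (rem.take l)))
      = pvLookup (pvBuild code) ((rem.take l).map PySem.Str.upper) := by
    intro l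
    have hg1 : ∀ w ∈ rem.take l, pvGoodS w := fun w hw => hg w (List.mem_of_mem_take hw)
    have hg2 : ∀ w ∈ (rem.take l).map PySem.Str.upper, pvGoodS w := by
      intro w hw
      rcases List.mem_map.mp hw with ⟨x, hx, rfl⟩
      exact pv_goodS_upper x (hg1 x hx)
    rw [pv_normalize_join _ hg1, pv_normMap_mDict code _ hg2, pv_lookup_build]
  have hbound : ∀ l, min (pvMaxWords (pvNormMap code)) rem.length < l → l ≤ rem.length →
      pvLookup (pvBuild code) ((rem.take l).map PySem.Str.upper) = none := by
    intro l h1 h2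
    cases hv : pvLookup (pvBuild code) ((rem.take l).map PySem.Str.upper) with
    | none => rfl
    | some v =>
      exfalso
      rw [pv_lookup_build] at hv
      have hg1 : ∀ w ∈ rem.take l, pvGoodS w := fun w hw => hg w (List.mem_of_mem_take hw)
      have hg2 : ∀ w ∈ (rem.take l).map PySem.Str.upper, pvGoodS w := by
        intro w hw
        rcases List.mem_map.mp hw with ⟨x, hx, rfl⟩
        exact pv_goodS_upper x (hg1 x hx)
      have hb := pv_maxWords_bound code _ v hg2 hv
      simp only [List.length_map, List.length_take] at hb
      omega
  rw [pv_tryA_eq_pick, pv_pick_congr _ _ _ hfun,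
    pv_pick_shrink _ (min (pvMaxWords (pvNormMap code)) rem.length) rem.length
      (Nat.min_le_right _ _) hbound |>.symm,
    pv_walk_eq_pick rem (pvBuild code) 0 none]
  cases hp : pvPick (fun l => pvLookup (pvBuild code) ((rem.take l).map PySem.Str.upper)) rem.length with
  | none => rfl
  | some vl =>
    obtain ⟨v, l⟩ := vl
    show some (v, l) = some (v, 0 + l)
    rw [Nat.zero_add]

lemma pv_loop_eq_aux (code : List (String × String)) :
    ∀ (n : Nat) (rem : List String), rem.length ≤ n → (∀ w ∈ rem, pvGoodS w) →
      pvLoopA (pvNormMap code) (pvMaxWords (pvNormMap code)) rem = pvLoopB (pvBuild code) rem := by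
  intro n
  induction n with
  | zero =>
    intro rem hn _
    have : rem = [] := List.eq_nil_of_length_eq_zero (by omega)
    subst this
    rw [pvLoopA, pvLoopB]
  | succ n ih =>
    intro rem hn hg
    cases rem with
    | nil => rw [pvLoopA, pvLoopB]
    | cons t ts =>
      rw [pvLoopA, pvLoopB]
      have hstep := pv_step_eq code (t :: ts) hg
      simp only [List.length_cons] at hstep
      rw [← hstep]
      cases h : pvTryA (pvNormMap code) (min (pvMaxWords (pvNormMap code)) (ts.length + 1)) (t :: ts) with
      | none =>
        simp only [List.length_cons] at hn
        show t :: pvLoopA (pvNormMap code) (pvMaxWords (pvNormMap code)) ts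
          = t :: pvLoopB (pvBuild code) ts
        rw [ih ts (by omega) (fun w hw => hg w (by simp [hw]))]
      | some vl =>
        obtain ⟨v, l⟩ := vl
        simp only [List.length_cons] at hn
        show v :: pvLoopA (pvNormMap code) (pvMaxWords (pvNormMap code)) (ts.drop (l - 1))
          = v :: pvLoopB (pvBuild code) (ts.drop (l - 1))
        rw [ih (ts.drop (l - 1)) (by simp only [List.length_drop]; omega)
          (fun w hw => hg w (by simp [List.mem_of_mem_drop hw]))]

lemma pv_loop_eq (code : List (String × String)) (rem : List String) (hg : ∀ w ∈ rem, pvGoodS w) :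
    pvLoopA (pvNormMap code) (pvMaxWords (pvNormMap code)) rem = pvLoopB (pvBuild code) rem := by
  exact pv_loop_eq_aux code rem.length rem (le_refl _) hg

-- ===== VERDICT (by name: the statement is the Claim_ definition above) =====
theorem repertoire_encrypt_spec : Claim_equal_repertoire_encrypt := by
  intro text code _ _
  unfold Spec_repertoire_encrypt repertoire_encrypt repertoire_encrypt_alt
  by_cases h : text = ""
  · simp [h]
  · simp only [h, if_false]
    rw [pv_strS_split_strip, pv_loop_eq]
    exact pv_goodS_split text
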